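-- pv_equiv track=rewrite | github.com/daniel-reich/ubiquitous-fiesta | 8cJnRPxtjNP64k5fq_2.py | dance
-- ===== SOURCE A (Python) =====
-- def dance(lst, parameter):
--   w_po, m_po = [], []
--   for i in range(len(lst)):
--     w_po.append(lst[i][0])
--     m_po.append(lst[i][1])
--   if parameter == 'men':
--     m_po.reverse()
--   else:
--     w_po.reverse()
--   return [[i, j] for i,j in zip(w_po, m_po)]
-- ===== SOURCE B (Python) =====
-- def dance(lst, parameter):
--   n = len(lst)
--   if parameter == 'men':
--     return [[lst[i][0], lst[n-1-i][1]] for i in range(n)]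
--   else:
--     return [[lst[n-1-i][0], lst[i][1]] for i in range(n)]
-- ===== Notes on version B (the rewrite author's own statement) =====
-- stated objective: simpler
-- what changed: replaces the two scratch lists plus an explicit .reverse() with a single comprehension using a mirrored index n-1-i
import Mathlib
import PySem

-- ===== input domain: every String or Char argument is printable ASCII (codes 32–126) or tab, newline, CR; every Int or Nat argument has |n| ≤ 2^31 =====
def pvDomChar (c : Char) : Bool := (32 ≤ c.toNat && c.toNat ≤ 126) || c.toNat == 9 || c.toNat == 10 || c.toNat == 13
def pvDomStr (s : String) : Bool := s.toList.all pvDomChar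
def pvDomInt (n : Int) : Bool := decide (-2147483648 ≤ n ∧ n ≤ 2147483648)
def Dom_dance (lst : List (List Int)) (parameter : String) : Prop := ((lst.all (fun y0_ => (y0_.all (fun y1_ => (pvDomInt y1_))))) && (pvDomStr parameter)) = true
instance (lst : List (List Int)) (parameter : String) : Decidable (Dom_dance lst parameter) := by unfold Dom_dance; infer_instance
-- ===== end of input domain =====

-- B builds the paired rows in one comprehension with a mirrored index n-1-i instead of A's two scratch lists and an explicit reverse (objective: simpler).

-- ===== PORT A =====
def dance (lst : List (List Int)) (parameter : String) : List (List Int) :=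
  let st := (List.range lst.length).foldl
    (fun (st : List Int × List Int) (i : Nat) =>
      (st.1 ++ [PySem.List.pyGetD (PySem.List.pyGetD lst (i : Int) []) 0 0],
       st.2 ++ [PySem.List.pyGetD (PySem.List.pyGetD lst (i : Int) []) 1 0])) ([], [])
  let wm := if parameter == "men" then (st.1, st.2.reverse) else (st.1.reverse, st.2)
  (wm.1.zip wm.2).map (fun p => [p.1, p.2])

-- ===== PORT B =====
def dance_alt (lst : List (List Int)) (parameter : String) : List (List Int) :=
  let n := lst.length
  if parameter == "men" then
    (List.range n).map (fun (i : Nat) =>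
      [PySem.List.pyGetD (PySem.List.pyGetD lst (i : Int) []) 0 0,
       PySem.List.pyGetD (PySem.List.pyGetD lst ((n : Int) - 1 - (i : Int)) []) 1 0])
  else
    (List.range n).map (fun (i : Nat) =>
      [PySem.List.pyGetD (PySem.List.pyGetD lst ((n : Int) - 1 - (i : Int)) []) 0 0,
       PySem.List.pyGetD (PySem.List.pyGetD lst (i : Int) []) 1 0])

-- ===== PRECONDITION & SPEC =====
-- Pre_ excludes exactly the lists with a row of fewer than 2 elements: there Python A (and B) raise IndexError.
def Pre_dance (lst : List (List Int)) (parameter : String) : Prop :=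
  ∀ row ∈ lst, 2 ≤ row.length
instance (lst : List (List Int)) (parameter : String) : Decidable (Pre_dance lst parameter) := by unfold Pre_dance; infer_instance
def pvWitness_dance : List (List Int) × String := ([[1, 2], [3, 4]], "men")

def Spec_dance (lst : List (List Int)) (parameter : String) (out : List (List Int)) : Prop := out = dance_alt lst parameter
instance (lst : List (List Int)) (parameter : String) (out : List (List Int)) : Decidable (Spec_dance lst parameter out) := by unfold Spec_dance; infer_instance

-- ===== CLAIM (what is proved, stated in full; the proofs are below) =====
def Claim_equal_dance : Prop := ∀ (lst : List (List Int)) (parameter : String), Dom_dance lst parameter → Pre_dance lst parameter → Spec_dance lst parameter (dance lst parameter)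

-- ===== LEMMAS AND PROOFS =====

-- A's loop appends to both lists in lockstep: it is the pair of maps.
theorem pv_foldl_pair {α β γ : Type} (fw : α → β) (fm : α → γ) :
    ∀ (l : List α) (a : List β) (b : List γ),
      l.foldl (fun st i => (st.1 ++ [fw i], st.2 ++ [fm i])) (a, b)
        = (a ++ l.map fw, b ++ l.map fm) := by
  intro l
  induction l with
  | nil => simp
  | cons x xs ih => intro a b; simp [List.foldl_cons, ih]

-- zipping one mapped range with the reverse of another mapped range = one map with a mirrored index
theorem pv_zip_rev (n : ℕ) (fw fm : ℕ → Int) :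
    (((List.range n).map fw).zip (((List.range n).map fm).reverse)).map (fun p => [p.1, p.2])
      = (List.range n).map (fun (i : Nat) => [fw i, fm (n - 1 - i)]) := by
  apply List.ext_getElem
  · simp
  · intro i h1 h2
    simp [List.getElem_zip, List.getElem_reverse]

theorem pv_zip_rev' (n : ℕ) (fw fm : ℕ → Int) :
    ((((List.range n).map fw).reverse).zip ((List.range n).map fm)).map (fun p => [p.1, p.2])
      = (List.range n).map (fun (i : Nat) => [fw (n - 1 - i), fm i]) := by
  apply List.ext_getElem
  · simp
  · intro i h1 h2
    simp [List.getElem_zip, List.getElem_reverse]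

-- ===== VERDICT (by name: the statement is the Claim_ definition above) =====
theorem dance_spec : Claim_equal_dance := by
  intro lst parameter _ _
  unfold Spec_dance dance dance_alt
  simp only [pv_foldl_pair, List.nil_append]
  by_cases hp : parameter == "men" <;> simp only [hp, if_pos, if_true, if_false, Bool.false_eq_true, ite_false, ite_true]
  · rw [pv_zip_rev]
    apply List.map_congr_left
    intro i hi
    simp only [List.mem_range] at hi
    have : ((lst.length : Int) - 1 - (i : Int)) = ((lst.length - 1 - i : ℕ) : Int) := by push_cast; omega
    rw [this]
  · rw [pv_zip_rev']
    apply List.map_congr_left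
    intro i hi
    simp only [List.mem_range] at hi
    have : ((lst.length : Int) - 1 - (i : Int)) = ((lst.length - 1 - i : ℕ) : Int) := by push_cast; omega
    rw [this]
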